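-- pv_equiv track=rewrite | github.com/tjkpolisher/codingTestTheories | 백준/Silver/5093. Letter Replacement/Letter Replacement.py | transform_word
-- ===== SOURCE A (Python) =====
-- def transform_word(word):
--     symbols = ['*', '?', '/', '+', '!']
--     seen = set()  # 이미 등장한 문자(소문자 변환 기준)
--     repeated_symbols = {}  # 중복이 처음 확인된 소문자 -> 할당된 기호
--     symbol_index = 0  # 몇 번째로 중복이 발생한 문자인가(0~4)
--
--     result = []
--
--     for char in word:
--         lower_char = char.lower()
--
--         if lower_char not in seen:
--             # 아직 등장하지 않은 문자
--             seen.add(lower_char)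
--             result.append(char)
--         else:
--             # 이미 등장한(중복) 문자
--             if lower_char not in repeated_symbols:
--                 # 이 중복 문자가 처음 등장한 경우
--                 # 아직 할당되지 않았다면 symbols[symbol_index]를 할당
--                 repeated_symbols[lower_char] = symbols[symbol_index]
--                 symbol_index += 1
--             # 이미 할당된 기호로 대체
--             result.append(repeated_symbols[lower_char])
--
--     return ''.join(result)
-- ===== SOURCE B (Python) =====
-- def transform_word(word):
--     symbols = ['*', '?', '/', '+', '!']
--     # Pass 1: build the replacement table (lowercased letter -> symbol, in order
--     # of first repetition), without producing any output.
--     repeated = {}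
--     seen = set()
--     idx = 0
--     for char in word:
--         lc = char.lower()
--         if lc in seen and lc not in repeated:
--             repeated[lc] = symbols[idx]
--             idx += 1
--         seen.add(lc)
--     # Pass 2: transform using the finished table.
--     out = []
--     seen = set()
--     for char in word:
--         lc = char.lower()
--         if lc in seen:
--             out.append(repeated[lc])
--         else:
--             seen.add(lc)
--             out.append(char)
--     return ''.join(out)
-- ===== Notes on version B (the rewrite author's own statement) =====
-- stated objective: alternative
-- what changed: B separates the work into two passes: a first pass that only builds the letter-to-symbol replacement table, and a second pass that transforms the word using the finished table, instead of A's single pass that interleaves table construction with output production.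
import Mathlib
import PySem

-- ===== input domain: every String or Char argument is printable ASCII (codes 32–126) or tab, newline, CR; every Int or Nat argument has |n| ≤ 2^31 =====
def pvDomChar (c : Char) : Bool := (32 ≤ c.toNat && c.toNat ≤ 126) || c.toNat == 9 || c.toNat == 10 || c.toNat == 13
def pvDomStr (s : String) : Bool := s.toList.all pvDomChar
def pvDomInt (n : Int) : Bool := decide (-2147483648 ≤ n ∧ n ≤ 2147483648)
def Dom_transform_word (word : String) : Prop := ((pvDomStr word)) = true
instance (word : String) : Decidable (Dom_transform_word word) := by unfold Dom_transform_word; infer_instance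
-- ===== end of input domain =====

-- B builds the replacement table in a first pass and transforms in a second pass,
-- instead of A's single pass that interleaves both (objective: alternative decomposition).


-- ===== PORT A =====
-- symbols = ['*', '?', '/', '+', '!'] (local in A; a named constant here)
def pvSymbolsA : List String := ["*", "?", "/", "+", "!"]

-- one iteration of A's loop; state = (seen, repeated_symbols, symbol_index, result).
-- 'symbols[symbol_index]' is pyGet? (none = IndexError, excluded by Pre_); '.getD ""' totalises.
def stepA (st : PySem.Set Char × PySem.Dict Char String × Int × List String) (c : Char) :
    PySem.Set Char × PySem.Dict Char String × Int × List String :=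
  match st with
  | (seen, rep, idx, res) =>
    let lc := PySem.Chars.lowerChar c
    if seen.contains lc = false then
      (seen.add lc, rep, idx, res ++ [String.ofList [c]])
    else if rep.contains lc = false then
      let rep' := rep.insert lc ((PySem.List.pyGet? pvSymbolsA idx).getD "")
      (seen, rep', idx + 1, res ++ [rep'.getD lc ""])
    else
      (seen, rep, idx, res ++ [rep.getD lc ""])

def transform_word (word : String) : String :=
  PySem.Str.join ""
    (word.toList.foldl stepA (PySem.Set.empty, PySem.Dict.empty, 0, [])).2.2.2

-- ===== PORT B =====
def pvSymbolsB : List String := ["*", "?", "/", "+", "!"]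

-- pass 1 of B: build the table only; state = (seen, repeated, idx)
def stepB1 (st : PySem.Set Char × PySem.Dict Char String × Int) (c : Char) :
    PySem.Set Char × PySem.Dict Char String × Int :=
  match st with
  | (seen, rep, idx) =>
    let lc := PySem.Chars.lowerChar c
    if seen.contains lc = true ∧ rep.contains lc = false then
      (seen.add lc, rep.insert lc ((PySem.List.pyGet? pvSymbolsB idx).getD ""), idx + 1)
    else
      (seen.add lc, rep, idx)

-- pass 2 of B: transform with the finished table; state = (seen, out)
def stepB2 (rep : PySem.Dict Char String) (st : PySem.Set Char × List String) (c : Char) :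
    PySem.Set Char × List String :=
  match st with
  | (seen, out) =>
    let lc := PySem.Chars.lowerChar c
    if seen.contains lc = true then
      (seen, out ++ [rep.getD lc ""])
    else
      (seen.add lc, out ++ [String.ofList [c]])

def transform_word_alt (word : String) : String :=
  let rep := (word.toList.foldl stepB1 (PySem.Set.empty, PySem.Dict.empty, 0)).2.1
  PySem.Str.join ""
    ((word.toList.foldl (stepB2 rep) (PySem.Set.empty, [])).2)

-- ===== PRECONDITION & SPEC =====
-- Python A raises IndexError (symbols[symbol_index] with symbol_index = 5) as soon as a sixth
-- distinct case-folded character repeats; Pre_ admits exactly the words with at most five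
-- distinct repeated (lowercased) characters, i.e. exactly the inputs where A returns.
def Pre_transform_word (word : String) : Prop :=
  ((PySem.Set.ofList (PySem.Chars.lower word.toList)).filter
      (fun c => 2 ≤ (PySem.Chars.lower word.toList).count c)).length ≤ 5
instance (word : String) : Decidable (Pre_transform_word word) := by
  unfold Pre_transform_word; infer_instance

def pvWitness_transform_word : String := "Hello hello"

def Spec_transform_word (word : String) (out : String) : Prop := out = transform_word_alt word
instance (word : String) (out : String) : Decidable (Spec_transform_word word out) := by unfold Spec_transform_word; infer_instance

-- ===== CLAIM (what is proved, stated in full; the proofs are below) =====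
def Claim_equal_transform_word : Prop := ∀ (word : String), Dom_transform_word word → Pre_transform_word word → Spec_transform_word word (transform_word word)

-- ===== LEMMAS AND PROOFS =====

-- the two ports' symbol tables are the same literal list
theorem symAB : pvSymbolsB = pvSymbolsA := rfl

-- pass 1 never overwrites an existing table entry
theorem stepB1_mono (l : List Char) (seen : PySem.Set Char) (rep : PySem.Dict Char String)
    (idx : Int) (k : Char) (v : String) (h : rep.get? k = some v) :
    ((l.foldl stepB1 (seen, rep, idx)).2.1).get? k = some v := by
  induction l generalizing seen rep idx with
  | nil => exact h
  | cons c l ih =>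
    simp only [List.foldl_cons, stepB1]
    split
    · next hc =>
      apply ih
      rw [PySem.Dict.get?_insert_of_ne]
      · exact h
      · intro hk
        rw [hk] at h
        rw [(PySem.Dict.get?_eq_none_iff_contains rep _).mpr hc.2] at h
        exact (Option.some_ne_none v h.symm).elim
    · exact ih _ _ _ h

-- pass 2 accumulates by appending
theorem stepB2_acc (rep : PySem.Dict Char String) (l : List Char) (seen : PySem.Set Char)
    (out : List String) :
    l.foldl (stepB2 rep) (seen, out)
      = ((l.foldl (stepB2 rep) (seen, [])).1, out ++ (l.foldl (stepB2 rep) (seen, [])).2) := by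
  induction l generalizing seen out with
  | nil => simp
  | cons c l ih =>
    simp only [List.foldl_cons, stepB2]
    split <;> (rw [ih]; conv_rhs => rw [ih]) <;> simp

-- main invariant: A's interleaved run equals B's transform pass with the finished table
theorem mainA (l : List Char) (seen : PySem.Set Char) (rep : PySem.Dict Char String)
    (idx : Int) (acc : List String) :
    (l.foldl stepA (seen, rep, idx, acc)).2.2.2
      = acc ++ (l.foldl (stepB2 ((l.foldl stepB1 (seen, rep, idx)).2.1)) (seen, [])).2 := by
  induction l generalizing seen rep idx acc with
  | nil => simp
  | cons c l ih =>
    simp only [List.foldl_cons, stepA, stepB1, stepB2, symAB]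
    set lc := PySem.Chars.lowerChar c with hlc
    by_cases hs : seen.contains lc = true
    · have hadd : seen.add lc = seen :=
        PySem.Set.add_of_mem ((PySem.Set.contains_iff _ _).mp hs)
      by_cases hr : rep.contains lc = false
      · -- repeated char seen for the first time: both sides insert the symbol
        simp only [hs, hr, hadd, and_self, Bool.true_eq_false, if_false, if_true,
          List.nil_append]
        rw [ih]
        conv_rhs => rw [stepB2_acc]
        have hmono := stepB1_mono l seen
          (rep.insert lc ((PySem.List.pyGet? pvSymbolsA idx).getD "")) (idx + 1) lc
          ((PySem.List.pyGet? pvSymbolsA idx).getD "")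
          (PySem.Dict.get?_insert_self _ _ _)
        simp [PySem.Dict.getD_eq_get?_getD, hmono, PySem.Dict.get?_insert_self]
      · -- already-assigned repeated char: the table entry survives pass 1 unchanged
        rw [Bool.not_eq_false] at hr
        obtain ⟨v, hv⟩ : ∃ v, rep.get? lc = some v := by
          cases h : rep.get? lc with
          | none => rw [(PySem.Dict.get?_eq_none_iff_contains rep lc).mp h] at hr; cases hr
          | some v => exact ⟨v, rfl⟩
        simp only [hs, hr, hadd, Bool.true_eq_false, and_false, if_false, if_true,
          List.nil_append]
        rw [ih]
        conv_rhs => rw [stepB2_acc]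
        have hmono := stepB1_mono l seen rep idx lc v hv
        simp [PySem.Dict.getD_eq_get?_getD, hmono, hv]
    · -- fresh char: both sides record it as seen and keep it verbatim
      have hs' : seen.contains lc = false := by simpa using hs
      simp only [hs', Bool.false_eq_true, false_and, if_true, if_false,
        List.nil_append]
      rw [ih]
      conv_rhs => rw [stepB2_acc]
      simp

-- ===== VERDICT (by name: the statement is the Claim_ definition above) =====
theorem transform_word_spec : Claim_equal_transform_word := by
  intro word _ _
  unfold Spec_transform_word transform_word transform_word_alt
  rw [mainA]
  simp
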